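-- pv_equiv track=rewrite | github.com/ERGA-consortium/EARs | EARpdf_to_yaml.py | extract_metrics_table
-- ===== SOURCE A (Python) =====
-- from collections import OrderedDict
--
-- def extract_metrics_table(text):
--     start_phrase = "Quality metrics table"
--     end_phrase = "HiC contact map of curated assembly"
--
--     start_index = text.find(start_phrase)
--     end_index = text.find(end_phrase, start_index)
--
--     if start_index == -1 or end_index == -1:
--         return OrderedDict()
--
--     table_text = text[start_index:end_index]
--     lines = [line.strip() for line in table_text.split('\n') if line.strip()]
--
--     metrics = OrderedDict()
--
--     expected_rows = [
--         "Total bp", "GC %", "Gaps/Gbp", "Total gap bp", "Scaffolds",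
--         "Scaffold N50", "Scaffold L50", "Scaffold L90", "Contigs",
--         "Contig N50", "Contig L50", "Contig L90", "QV", "Kmer compl.",
--         "BUSCO sing.", "BUSCO dupl.", "BUSCO frag.", "BUSCO miss."
--     ]
--
--     # Find header lines
--     header_index = -1
--     for i, line in enumerate(lines):
--         if "Pre-curation" in line or "Curated" in line:
--             header_index = i
--             break
--
--     if header_index == -1 or header_index + 1 >= len(lines):
--         return OrderedDict()
--
--     header1 = lines[header_index].split()
--     header2 = lines[header_index + 1].split()
--
--     # Get number of columns and their headers
--     if len(header1) == 2:  # two-column case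
--         column_headers = [f"{header1[0]} {header2[1]}", f"{header1[1]} {header2[2]}"]
--     else:  # four-column case
--         column_headers = [f"{header1[i]} {header2[i+1]}" for i in range(len(header1))]
--
--     for header in column_headers:
--         metrics[header] = OrderedDict()
--
--     # Parse metrics
--     for line in lines[header_index + 2:]:
--         parts = line.split()
--         if len(parts) >= len(column_headers):
--             for expected_row in expected_rows:
--                 if line.startswith(expected_row):
--                     metric_name = expected_row
--                     values = parts[len(metric_name.split()):]
--                     if len(values) == len(column_headers):
--                         for i, header in enumerate(column_headers):
--                             metrics[header][metric_name] = values[i]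
--                     break
--
--     # Remove any empty dictionaries
--     metrics = OrderedDict({k: v for k, v in metrics.items() if v})
--
--     return metrics
-- ===== SOURCE B (Python) =====
-- from collections import OrderedDict
--
-- EXPECTED_ROWS = [
--     "Total bp", "GC %", "Gaps/Gbp", "Total gap bp", "Scaffolds",
--     "Scaffold N50", "Scaffold L50", "Scaffold L90", "Contigs",
--     "Contig N50", "Contig L50", "Contig L90", "QV", "Kmer compl.",
--     "BUSCO sing.", "BUSCO dupl.", "BUSCO frag.", "BUSCO miss."
-- ]
--
-- def _column(data, ncols, c):
--     """One pass over the data lines extracting column number c."""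
--     col = OrderedDict()
--     for line in data:
--         name = next((r for r in EXPECTED_ROWS if line.startswith(r)), None)
--         if name is not None:
--             values = line.split()[len(name.split()):]
--             if len(values) == ncols:
--                 col[name] = values[c]
--     return col
--
-- def extract_metrics_table(text):
--     # cut the section out with str.partition instead of index arithmetic
--     _, sep, rest = text.partition("Quality metrics table")
--     if not sep:
--         return OrderedDict()
--     body, sep2, _ = rest.partition("HiC contact map of curated assembly")
--     if not sep2:
--         return OrderedDict()
--     lines = [l for l in map(str.strip, (sep + body).split('\n')) if l]
--     # scan forward to the header line
--     i = 0
--     while i < len(lines) and "Pre-curation" not in lines[i] and "Curated" not in lines[i]: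
--         i += 1
--     if i + 1 >= len(lines):
--         return OrderedDict()
--     headers = [' '.join(p) for p in zip(lines[i].split(), lines[i + 1].split()[1:])]
--     data = lines[i + 2:]
--     # column-major assembly: each column is extracted by its own pass
--     result = OrderedDict()
--     for c, h in enumerate(headers):
--         col = _column(data, len(headers), c)
--         if col:
--             result[h] = col
--     return result
-- ===== Notes on version B (the rewrite author's own statement) =====
-- stated objective: alternative
-- what changed: B cuts the section out with two str.partition calls instead of find/index arithmetic, locates the header with a while-scan, builds the column headers by a single zip (no two-vs-four-column branch), drops A's redundant len(parts)>=ncols guard, and assembles the result COLUMN-MAJOR: each column is produced by its own complete pass over the data lines into a fresh OrderedDict (empty ones skipped), instead of A's row-major single pass that writes every row into pre-created nested dicts and filters empty columns afterwards. …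
import Mathlib
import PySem

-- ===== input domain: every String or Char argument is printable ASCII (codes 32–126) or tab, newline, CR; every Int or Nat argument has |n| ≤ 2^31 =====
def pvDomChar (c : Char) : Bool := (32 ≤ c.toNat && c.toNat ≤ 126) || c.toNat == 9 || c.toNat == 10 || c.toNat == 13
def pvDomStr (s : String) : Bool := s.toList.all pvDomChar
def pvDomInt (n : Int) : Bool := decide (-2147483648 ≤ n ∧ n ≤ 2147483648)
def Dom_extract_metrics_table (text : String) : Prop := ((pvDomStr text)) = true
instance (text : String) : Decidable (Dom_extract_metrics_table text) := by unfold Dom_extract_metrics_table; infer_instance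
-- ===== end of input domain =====

-- B re-implements A's table extraction with partition-based sectioning, a while-scan for the
-- header, zip-built column headers and COLUMN-MAJOR assembly (one pass per column), instead of
-- A's index arithmetic and row-major single pass into pre-created nested dicts; same return
-- value wherever A returns (Pre_ excludes only inputs where A raises IndexError).

-- shared constants / predicates (the same literals both Pythons use)
def pvExpectedRows : List String :=
  ["Total bp", "GC %", "Gaps/Gbp", "Total gap bp", "Scaffolds",
   "Scaffold N50", "Scaffold L50", "Scaffold L90", "Contigs",
   "Contig N50", "Contig L50", "Contig L90", "QV", "Kmer compl.",
   "BUSCO sing.", "BUSCO dupl.", "BUSCO frag.", "BUSCO miss."]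

def pvIsHeaderLine (l : String) : Bool :=
  PySem.Str.isIn "Pre-curation" l || PySem.Str.isIn "Curated" l

-- ===== PORT A =====

-- A's header-search loop (for i, line in enumerate(lines): … break), returning -1 if not found
def pvFindHeaderA : List String → Nat → Int
  | [], _ => -1
  | l :: ls, i => if pvIsHeaderLine l then (i : Int) else pvFindHeaderA ls (i + 1)

-- A's inner write loop: for i, header in enumerate(column_headers): metrics[header][name] = values[i]
def pvWriteRowA (name : String) (vals : List String) :
    PySem.Dict String (PySem.Dict String String) → Nat → List String →
      PySem.Dict String (PySem.Dict String String)
  | m, _, [] => m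
  | m, i, h :: hs =>
    pvWriteRowA name vals
      (m.insert h (((m.get? h).getD PySem.Dict.empty).insert name
        ((PySem.List.pyGet? vals (i : Int)).getD "")))
      (i + 1) hs

-- A's per-line body of the main loop
def pvStepA (hdrs : List String) (m : PySem.Dict String (PySem.Dict String String))
    (line : String) : PySem.Dict String (PySem.Dict String String) :=
  let parts := PySem.Str.split₀ line
  if hdrs.length ≤ parts.length then
    match pvExpectedRows.find? (fun r => PySem.Str.startswith line r) with
    | some name =>
      let vals := PySem.List.slice parts (some ((PySem.Str.split₀ name).length : Int)) none
      if vals.length = hdrs.length then pvWriteRowA name vals m 0 hdrs else m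
    | none => m
  else m

def extract_metrics_table (text : String) : List (String × List (String × String)) :=
  let start_index := PySem.Str.find text "Quality metrics table"
  let end_index := PySem.Str.findFrom text "HiC contact map of curated assembly" start_index
  if start_index = -1 ∨ end_index = -1 then []
  else
    -- table_text.split('\n'): the separator is nonempty, so split? is `some`
    let lines := (((PySem.Str.split? (PySem.Str.slice text (some start_index) (some end_index)) "\n").getD []).map
        PySem.Str.strip).filter (fun l => !l.toList.isEmpty)
    let header_index := pvFindHeaderA lines 0
    if header_index = -1 ∨ (lines.length : Int) ≤ header_index + 1 then []
    else
      -- lines[header_index] / lines[header_index+1]: in range by construction, `.getD ""` is never used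
      let header1 := PySem.Str.split₀ ((PySem.List.pyGet? lines header_index).getD "")
      let header2 := PySem.Str.split₀ ((PySem.List.pyGet? lines (header_index + 1)).getD "")
      -- header2[1], header2[2], header2[i+1] can raise IndexError in Python: Pre_ excludes those
      -- inputs, the `.getD ""` there is outside the claim
      let column_headers :=
        if header1.length = 2 then
          [PySem.Str.join " " [(PySem.List.pyGet? header1 0).getD "", (PySem.List.pyGet? header2 1).getD ""],
           PySem.Str.join " " [(PySem.List.pyGet? header1 1).getD "", (PySem.List.pyGet? header2 2).getD ""]]
        else
          (PySem.List.pyRange 0 (header1.length : Int) 1).map (fun i =>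
            PySem.Str.join " " [(PySem.List.pyGet? header1 i).getD "", (PySem.List.pyGet? header2 (i + 1)).getD ""])
      let metrics0 := column_headers.foldl (fun m h => m.insert h PySem.Dict.empty) PySem.Dict.empty
      let metrics := (PySem.List.slice lines (some (header_index + 2)) none).foldl
        (pvStepA column_headers) metrics0
      (metrics.items.filter (fun kv => !kv.2.items.isEmpty)).map (fun kv => (kv.1, kv.2.items))

-- ===== PORT B =====

-- str.partition, ported by hand via the first occurrence (exact: (s, '', '') when absent)
def pvPartition (s sep : String) : String × String × String :=
  let i := PySem.Str.find s sep
  if i = -1 then (s, "", "")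
  else (PySem.Str.slice s none (some i), sep,
        PySem.Str.slice s (some (i + PySem.Str.len sep)) none)

-- B's while loop: scan forward to the first header line (index = len(lines) if none)
def pvScanB : List String → Nat → Nat
  | [], i => i
  | l :: ls, i => if pvIsHeaderLine l then i else pvScanB ls (i + 1)

-- B's _column: one pass over the data lines extracting column number c
def pvColumnB (ncols c : Nat) : List String → PySem.Dict String String → PySem.Dict String String
  | [], col => col
  | line :: ls, col =>
    pvColumnB ncols c ls
      (match pvExpectedRows.find? (fun r => PySem.Str.startswith line r) with
       | none => col
       | some name =>
         let vals := PySem.List.slice (PySem.Str.split₀ line)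
           (some ((PySem.Str.split₀ name).length : Int)) none
         if vals.length = ncols then
           col.insert name ((PySem.List.pyGet? vals (c : Int)).getD "")
         else col)

-- B's outer loop: for c, h in enumerate(headers): col = _column(data, ncols, c); if col: result[h] = col
def pvBuildColsB (data : List String) (ncols : Nat) :
    PySem.Dict String (PySem.Dict String String) → Nat → List String →
      PySem.Dict String (PySem.Dict String String)
  | res, _, [] => res
  | res, c, h :: hs =>
    let col := pvColumnB ncols c data PySem.Dict.empty
    pvBuildColsB data ncols (if col.items.isEmpty then res else res.insert h col) (c + 1) hs

def extract_metrics_table_alt (text : String) : List (String × List (String × String)) :=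
  let p := pvPartition text "Quality metrics table"
  if p.2.1 = "" then []
  else
    let q := pvPartition p.2.2 "HiC contact map of curated assembly"
    if q.2.1 = "" then []
    else
      let table := PySem.Str.join "" [p.2.1, q.1]
      let lines := (((PySem.Str.split? table "\n").getD []).map PySem.Str.strip).filter
        (fun l => !l.toList.isEmpty)
      let i := pvScanB lines 0
      if lines.length ≤ i + 1 then []
      else
        let header1 := PySem.Str.split₀ ((PySem.List.pyGet? lines (i : Int)).getD "")
        let header2 := PySem.Str.split₀ ((PySem.List.pyGet? lines ((i : Int) + 1)).getD "")
        let headers := (header1.zip (PySem.List.slice header2 (some 1) none)).map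
          (fun pr => PySem.Str.join " " [pr.1, pr.2])
        let data := PySem.List.slice lines (some ((i : Int) + 2)) none
        (pvBuildColsB data headers.length PySem.Dict.empty 0 headers).items.map
          (fun kv => (kv.1, kv.2.items))

-- ===== PRECONDITION & SPEC =====

-- Pre_ excludes exactly the inputs on which A raises IndexError: a metrics table and a header
-- line are found, but the line after the header has too few words for A's header2[·] indexing
-- (header1 nonempty and len(header2) < len(header1) + 1).
-- the stripped nonempty lines of the table slice (used only to state Pre_)
def pvTableLines (text : String) : List String :=
  let start := PySem.Str.find text "Quality metrics table"
  let stop := PySem.Str.findFrom text "HiC contact map of curated assembly" start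
  (((PySem.Str.split? (PySem.Str.slice text (some start) (some stop)) "\n").getD []).map
      PySem.Str.strip).filter (fun l => !l.toList.isEmpty)

-- the line after the header row has enough words for A's header2[len(header1)] indexing
def pvHeaderOk (lines : List String) : Bool :=
  match lines.findIdx? pvIsHeaderLine with
  | none => true
  | some hi =>
    decide (lines.length ≤ hi + 1) ||
      (let h1 := PySem.Str.split₀ (lines.getD hi "")
       let h2 := PySem.Str.split₀ (lines.getD (hi + 1) "")
       decide (h1.length = 0) || decide (h1.length + 1 ≤ h2.length))

def Pre_extract_metrics_table (text : String) : Prop :=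
  PySem.Str.find text "Quality metrics table" = -1 ∨
  PySem.Str.findFrom text "HiC contact map of curated assembly"
      (PySem.Str.find text "Quality metrics table") = -1 ∨
  pvHeaderOk (pvTableLines text) = true

instance (text : String) : Decidable (Pre_extract_metrics_table text) := by
  unfold Pre_extract_metrics_table; infer_instance

def pvWitness_extract_metrics_table : String :=
  "Quality metrics table\nPre-curation Curated\nx y z\nTotal bp 1 2\nHiC contact map of curated assembly"

def Spec_extract_metrics_table (text : String) (out : List (String × List (String × String))) : Prop :=
  out = extract_metrics_table_alt text

instance (text : String) (out : List (String × List (String × String))) :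
    Decidable (Spec_extract_metrics_table text out) := by
  unfold Spec_extract_metrics_table; infer_instance

-- ===== CLAIM (what is proved, stated in full; the proofs are below) =====
def Claim_equal_extract_metrics_table : Prop :=
  ∀ (text : String), Dom_extract_metrics_table text → Pre_extract_metrics_table text →
    Spec_extract_metrics_table text (extract_metrics_table text)

-- ===== LEMMAS AND PROOFS =====

-- A's header loop and B's while-scan, both related to List.findIdx?
theorem pvFindHeaderA_eq (ls : List String) :
    ∀ k, pvFindHeaderA ls k = (match ls.findIdx? pvIsHeaderLine with
      | none => (-1 : Int) | some j => ((j + k : Nat) : Int)) := by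
  induction ls with
  | nil => intro k; simp [pvFindHeaderA]
  | cons l t ih =>
    intro k
    simp only [pvFindHeaderA, List.findIdx?_cons]
    by_cases h : pvIsHeaderLine l
    · simp [h]
    · rw [if_neg h, if_neg h, ih (k + 1)]
      cases List.findIdx? pvIsHeaderLine t with
      | none => simp
      | some j => simp [Nat.add_comm, Nat.add_left_comm]

theorem pvScanB_eq (ls : List String) :
    ∀ k, pvScanB ls k = (match ls.findIdx? pvIsHeaderLine with
      | none => ls.length + k | some j => j + k) := by
  induction ls with
  | nil => intro k; simp [pvScanB]
  | cons l t ih =>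
    intro k
    simp only [pvScanB, List.findIdx?_cons]
    by_cases h : pvIsHeaderLine l
    · simp [h]
    · rw [if_neg h, if_neg h, ih (k + 1)]
      cases List.findIdx? pvIsHeaderLine t with
      | none => simp [Nat.add_comm, Nat.add_left_comm]
      | some j => simp [Nat.add_comm, Nat.add_left_comm]

-- a row parser (proof-side name for what both programs do to one data line)
def pvParseRowB (ncols : Nat) (line : String) : Option (String × List String) :=
  let parts := PySem.Str.split₀ line
  if parts.length < ncols then none
  else
    match pvExpectedRows.find? (fun r => PySem.Str.startswith line r) with
    | none => none
    | some name =>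
      let vals := PySem.List.slice parts (some ((PySem.Str.split₀ name).length : Int)) none
      if vals.length = ncols then some (name, vals) else none

-- column i of the parsed row table
def pvColB (rows : List (String × List String)) (i : Nat) : PySem.Dict String String :=
  rows.foldl (fun d r => d.insert r.1 ((PySem.List.pyGet? r.2 (i : Int)).getD "")) PySem.Dict.empty

-- B's per-column pass equals a fold over the parsed row table (A's first guard is redundant:
-- a shorter word list can never yield exactly ncols values)
theorem pvColumnB_eq (ncols c : Nat) : ∀ (data : List String) (col : PySem.Dict String String),
    pvColumnB ncols c data col =
      (data.filterMap (pvParseRowB ncols)).foldl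
        (fun d r => d.insert r.1 ((PySem.List.pyGet? r.2 (c : Int)).getD "")) col := by
  intro data
  induction data with
  | nil => intro col; rfl
  | cons line ls ih =>
    intro col
    rw [List.filterMap_cons]
    simp only [pvColumnB, pvParseRowB]
    by_cases hg : (PySem.Str.split₀ line).length < ncols
    · rw [if_pos hg]
      cases hf : pvExpectedRows.find? (fun r => PySem.Str.startswith line r) with
      | none => simp only [hf]; exact ih col
      | some name =>
        simp only [hf]
        have hle : (PySem.List.slice (PySem.Str.split₀ line)
            (some ((PySem.Str.split₀ name).length : Int)) none).length ≤
              (PySem.Str.split₀ line).length := by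
          rw [PySem.List.slice_from _ (Int.natCast_nonneg _)]
          simp
        rw [if_neg (by omega)]
        exact ih col
    · rw [if_neg hg]
      cases hf : pvExpectedRows.find? (fun r => PySem.Str.startswith line r) with
      | none => simp only [hf]; exact ih col
      | some name =>
        simp only [hf]
        by_cases hv : (PySem.List.slice (PySem.Str.split₀ line)
            (some ((PySem.Str.split₀ name).length : Int)) none).length = ncols
        · rw [if_pos hv, if_pos hv, List.foldl_cons]
          exact ih _
        · rw [if_neg hv, if_neg hv]
          exact ih col

-- the row-table form of B's outer loop (proof-side)
def pvBuildResB (rows : List (String × List String)) :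
    PySem.Dict String (PySem.Dict String String) → Nat → List String →
      PySem.Dict String (PySem.Dict String String)
  | res, _, [] => res
  | res, i, h :: hs =>
    let col := pvColB rows i
    pvBuildResB rows (if col.items.isEmpty then res else res.insert h col) (i + 1) hs

theorem pvBuildColsB_eq (data : List String) (ncols : Nat) : ∀ (hs : List String) (c : Nat)
    (res : PySem.Dict String (PySem.Dict String String)),
    pvBuildColsB data ncols res c hs =
      pvBuildResB (data.filterMap (pvParseRowB ncols)) res c hs := by
  intro hs
  induction hs with
  | nil => intro c res; rfl
  | cons h t ih =>
    intro c res
    simp only [pvBuildColsB, pvBuildResB]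
    rw [pvColumnB_eq]
    exact ih (c + 1) _

-- A's four-column header comprehension equals B's zip, given enough words in header2
theorem pvHeadersRange_eq (h1 h2 : List String) (hlen : h1.length + 1 ≤ h2.length) :
    (PySem.List.pyRange 0 (h1.length : Int) 1).map (fun i =>
        PySem.Str.join " " [(PySem.List.pyGet? h1 i).getD "", (PySem.List.pyGet? h2 (i + 1)).getD ""]) =
      (h1.zip h2.tail).map (fun p => PySem.Str.join " " [p.1, p.2]) := by
  have hr : PySem.List.pyRange 0 (h1.length : Int) 1 =
      (List.range h1.length).map (Nat.cast : Nat → Int) := by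
    rw [PySem.List.pyRange_of_pos 0 _ (by norm_num)]
    rcases Nat.eq_zero_or_pos h1.length with h0 | hp
    · simp [h0]
    · have hlt : (0 : Int) < (h1.length : Int) := by exact_mod_cast hp
      rw [if_pos hlt]
      have harg : (((h1.length : Int) - 0 + 1 - 1) / 1).toNat = h1.length := by norm_num
      rw [harg]
      apply List.map_congr_left
      intro k _
      simp
  rw [hr, List.map_map]
  apply List.ext_getElem
  · simp only [List.length_map, List.length_range, List.length_zip, List.length_tail]
    omega
  · intro k hk1 hk2
    have hk : k < h1.length := by simpa using hk1
    have hk2' : k + 1 < h2.length := by omega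
    simp only [List.getElem_map, List.getElem_range, Function.comp_apply, List.getElem_zip]
    have e1 : PySem.List.pyGet? h1 (k : Int) = some h1[k] := by
      rw [PySem.List.pyGet?_natCast]; exact List.getElem?_eq_getElem hk
    have ecast : ((k : Int) + 1) = ((k + 1 : Nat) : Int) := by push_cast; ring
    have e2 : PySem.List.pyGet? h2 ((k : Int) + 1) = some h2[k + 1] := by
      rw [ecast, PySem.List.pyGet?_natCast]; exact List.getElem?_eq_getElem hk2'
    rw [e1, e2]
    simp [List.getElem_tail]

-- the two spellings of the column headers
def pvColHeadersA (h1 h2 : List String) : List String :=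
  if h1.length = 2 then
    [PySem.Str.join " " [(PySem.List.pyGet? h1 0).getD "", (PySem.List.pyGet? h2 1).getD ""],
     PySem.Str.join " " [(PySem.List.pyGet? h1 1).getD "", (PySem.List.pyGet? h2 2).getD ""]]
  else
    (PySem.List.pyRange 0 (h1.length : Int) 1).map (fun i =>
      PySem.Str.join " " [(PySem.List.pyGet? h1 i).getD "", (PySem.List.pyGet? h2 (i + 1)).getD ""])

def pvHeadersB (h1 h2 : List String) : List String :=
  (h1.zip (PySem.List.slice h2 (some 1) none)).map (fun p => PySem.Str.join " " [p.1, p.2])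

-- A's two branches for the column headers both equal B's single zip
theorem pvHeaders_eq (h1 h2 : List String)
    (hlen : h1.length = 0 ∨ h1.length + 1 ≤ h2.length) :
    pvColHeadersA h1 h2 = pvHeadersB h1 h2 := by
  unfold pvColHeadersA pvHeadersB
  rw [PySem.List.slice_from_one]
  rcases hlen with h0 | hlen
  · rw [List.length_eq_zero_iff] at h0
    subst h0
    rw [if_neg (by simp)]
    rw [PySem.List.pyRange_of_pos 0 _ (by norm_num)]
    simp
  · by_cases h2c : h1.length = 2
    · rw [if_pos h2c]
      obtain ⟨a, b, rfl⟩ := List.length_eq_two.mp h2c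
      rcases h2 with _ | ⟨c, _ | ⟨d, _ | ⟨e, t⟩⟩⟩ <;>
        simp only [List.length_cons, List.length_nil] at hlen <;> try omega
      rw [show (0 : Int) = ((0 : Nat) : Int) from rfl, show (1 : Int) = ((1 : Nat) : Int) from rfl,
        show (2 : Int) = ((2 : Nat) : Int) from rfl, PySem.List.pyGet?_natCast,
        PySem.List.pyGet?_natCast, PySem.List.pyGet?_natCast, PySem.List.pyGet?_natCast]
      rfl
    · rw [if_neg h2c]
      exact pvHeadersRange_eq h1 h2 hlen

-- A's per-line step is the row parser followed by A's write loop
theorem pvStepA_eq (hdrs : List String) (m : PySem.Dict String (PySem.Dict String String))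
    (line : String) :
    pvStepA hdrs m line = (match pvParseRowB hdrs.length line with
      | none => m
      | some r => pvWriteRowA r.1 r.2 m 0 hdrs) := by
  simp only [pvStepA, pvParseRowB]
  by_cases hlen : hdrs.length ≤ (PySem.Str.split₀ line).length
  · rw [if_pos hlen, if_neg (by omega)]
    cases hf : pvExpectedRows.find? (fun r => PySem.Str.startswith line r) with
    | none => rfl
    | some name =>
      simp only []
      by_cases hv : (PySem.List.slice (PySem.Str.split₀ line)
          (some ((PySem.Str.split₀ name).length : Int)) none).length = hdrs.length
      · rw [if_pos hv, if_pos hv]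
      · rw [if_neg hv, if_neg hv]
  · rw [if_neg hlen, if_pos (by omega)]

-- the fold of A's step is a fold of A's write loop over the parsed row table
theorem pvFold_filterMap (hdrs : List String) : ∀ (ls : List String)
    (m : PySem.Dict String (PySem.Dict String String)),
    ls.foldl (pvStepA hdrs) m =
      (ls.filterMap (pvParseRowB hdrs.length)).foldl
        (fun m r => pvWriteRowA r.1 r.2 m 0 hdrs) m := by
  intro ls
  induction ls with
  | nil => intro m; rfl
  | cons l t ih =>
    intro m
    rw [List.foldl_cons, List.filterMap_cons, pvStepA_eq]
    cases hp : pvParseRowB hdrs.length l with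
    | none => exact ih m
    | some r => rw [List.foldl_cons]; exact ih _

-- the LAST index at which a key occurs in a header suffix starting at position i
def pvLastIdxFrom : List String → Nat → String → Option Nat
  | [], _, _ => none
  | h :: t, i, k =>
    match pvLastIdxFrom t (i + 1) k with
    | some j => some j
    | none => if h = k then some i else none

theorem pvLastIdxFrom_mem : ∀ (hs : List String) (i : Nat) (k : String), k ∈ hs →
    ∃ j, pvLastIdxFrom hs i k = some j := by
  intro hs
  induction hs with
  | nil => intro i k hk; simp at hk
  | cons h t ih =>
    intro i k hk
    simp only [pvLastIdxFrom]
    cases hLt : pvLastIdxFrom t (i + 1) k with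
    | some j => exact ⟨j, rfl⟩
    | none =>
      rcases List.mem_cons.mp hk with rfl | hmem
      · exact ⟨i, by simp⟩
      · obtain ⟨j, hj⟩ := ih (i + 1) k hmem
        rw [hj] at hLt; cases hLt

-- A's write loop rewrites each stored column dict at the key's LAST header position
theorem pvWriteRowA_items (name : String) (vals : List String) :
    ∀ (hs : List String) (i : Nat) (m : PySem.Dict String (PySem.Dict String String)),
      m.keys.Nodup → (∀ h ∈ hs, m.contains h = true) →
      (pvWriteRowA name vals m i hs).items =
        m.items.map (fun kv =>
          match pvLastIdxFrom hs i kv.1 with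
          | some j => (kv.1, kv.2.insert name ((PySem.List.pyGet? vals (j : Int)).getD ""))
          | none => kv) := by
  intro hs
  induction hs with
  | nil =>
    intro i m _ _
    simp [pvWriteRowA, pvLastIdxFrom]
  | cons h t ih =>
    intro i m hnd hmem
    have hco : m.contains h = true := hmem h (List.mem_cons_self)
    have hm'items : (m.insert h (((m.get? h).getD PySem.Dict.empty).insert name
        ((PySem.List.pyGet? vals (i : Int)).getD ""))).items =
        m.items.map (fun p => if p.1 == h then
          (h, ((m.get? h).getD PySem.Dict.empty).insert name
            ((PySem.List.pyGet? vals (i : Int)).getD "")) else p) :=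
      PySem.Dict.items_insert_of_contains m _ hco
    have hnd' := PySem.Dict.nodup_keys_insert m h
      (((m.get? h).getD PySem.Dict.empty).insert name
        ((PySem.List.pyGet? vals (i : Int)).getD "")) hnd
    have hmem' : ∀ x ∈ t, (m.insert h (((m.get? h).getD PySem.Dict.empty).insert name
        ((PySem.List.pyGet? vals (i : Int)).getD ""))).contains x = true := by
      intro x hx
      rw [PySem.Dict.contains_insert]
      rw [hmem x (List.mem_cons_of_mem _ hx)]
      simp
    simp only [pvWriteRowA]
    rw [ih (i + 1) _ hnd' hmem', hm'items, List.map_map]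
    apply List.map_congr_left
    intro kv hkv
    simp only [Function.comp_apply]
    by_cases hk : kv.1 = h
    · have hget : m.get? h = some kv.2 := by
        apply PySem.Dict.get?_of_mem_items _ _ hnd
        rw [← hk]
        exact hkv
      rw [if_pos (by simp [hk]), hget]
      simp only [pvLastIdxFrom, ← hk]
      cases hLt : pvLastIdxFrom t (i + 1) kv.1 with
      | some j =>
        simp only [Option.getD_some]
        rw [PySem.Dict.insert_insert_self]
      | none => simp
    · rw [if_neg (by simp [hk])]
      simp only [pvLastIdxFrom]
      cases hLt : pvLastIdxFrom t (i + 1) kv.1 with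
      | some j => rfl
      | none => rw [if_neg (fun he => hk he.symm)]

-- A's initialisation loop: one empty column dict per DISTINCT header, in first-occurrence order
theorem pvInit_items : ∀ (hs : List String) (res : PySem.Dict String (PySem.Dict String String)),
    (hs.foldl (fun m h => m.insert h PySem.Dict.empty) res).items =
      res.items.map (fun kv => if kv.1 ∈ hs then (kv.1, (PySem.Dict.empty : PySem.Dict String String)) else kv) ++
        ((PySem.List.dedup hs).filter (fun h => !res.contains h)).map
          (fun h => (h, (PySem.Dict.empty : PySem.Dict String String))) := by
  intro hs
  induction hs with
  | nil => intro res; simp [PySem.List.dedup, PySem.Set.ofList]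
  | cons h t ih =>
    intro res
    rw [List.foldl_cons, ih (res.insert h PySem.Dict.empty)]
    rw [PySem.List.dedup_eq_ofList (h :: t), PySem.Set.ofList_cons, ← PySem.List.dedup_eq_ofList t]
    by_cases hc : res.contains h
    · rw [PySem.Dict.items_insert_of_contains res _ hc, List.map_map]
      congr 1
      · apply List.map_congr_left
        intro kv hkv
        simp only [Function.comp_apply]
        by_cases hk : kv.1 = h <;> by_cases ht : kv.1 ∈ t <;>
          simp [hk, ht]
      · rw [List.filter_cons_of_neg (by simp [hc])]
        rw [PySem.Set.discard, List.filter_filter]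
        congr 1
        apply List.filter_congr
        intro x hx
        rw [PySem.Dict.contains_insert]
        cases hxe : (x == h) <;> simp [hxe]
    · have hcf : res.contains h = false := by simpa using hc
      have hne : ∀ kv ∈ res.items, kv.1 ≠ h := by
        intro kv hkv he
        have : res.items.any (fun p => p.1 == h) = true :=
          List.any_eq_true.mpr ⟨kv, hkv, by simp [he]⟩
        rw [show res.items.any (fun p => p.1 == h) = res.contains h from rfl, hcf] at this
        cases this
      rw [PySem.Dict.items_insert_of_not_contains res _ hcf, List.map_append]
      rw [List.filter_cons_of_pos (by simp [hcf])]
      simp only [List.map_cons, List.map_nil]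
      rw [List.append_assoc]
      congr 1
      · apply List.map_congr_left
        intro kv hkv
        have hne' := hne kv hkv
        by_cases ht : kv.1 ∈ t <;> simp [ht, hne']
      · simp only [List.cons_append, List.nil_append, List.singleton_append]
        congr 1
        · split <;> rfl
        · rw [PySem.Set.discard, List.filter_filter]
          congr 1
          apply List.filter_congr
          intro x hx
          rw [PySem.Dict.contains_insert]
          cases hxe : (x == h) <;> simp [hxe]

theorem pvDictItemsEmpty {v : Type} : (PySem.Dict.empty : PySem.Dict String v).items = [] :=
  List.map_eq_nil_iff.mp PySem.Dict.keys_empty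

-- A's main fold, characterised: each distinct header's column dict is the fold of its
-- values (at the header's last position) over the row table
theorem pvFoldA_items (hdrs : List String) : ∀ (rows : List (String × List String))
    (m : PySem.Dict String (PySem.Dict String String)) (c : String → PySem.Dict String String),
    m.items = (PySem.List.dedup hdrs).map (fun h => (h, c h)) →
    (rows.foldl (fun m r => pvWriteRowA r.1 r.2 m 0 hdrs) m).items =
      (PySem.List.dedup hdrs).map (fun h => (h,
        rows.foldl (fun d r => d.insert r.1
          ((PySem.List.pyGet? r.2 (((pvLastIdxFrom hdrs 0 h).getD 0 : Nat) : Int)).getD ""))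
          (c h))) := by
  intro rows
  induction rows with
  | nil => intro m c hm; simpa using hm
  | cons r rs ih =>
    intro m c hm
    have hkeys : m.keys = PySem.List.dedup hdrs := by
      simp [PySem.Dict.keys, hm, List.map_map, Function.comp_def]
    have hnd : m.keys.Nodup := by rw [hkeys]; exact PySem.List.nodup_dedup hdrs
    have hmem : ∀ h ∈ hdrs, m.contains h = true := by
      intro h hh
      rw [PySem.Dict.contains_iff_mem_keys, hkeys]
      exact (PySem.List.mem_dedup hdrs h).mpr hh
    rw [List.foldl_cons]
    rw [ih _ (fun h => (c h).insert r.1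
        ((PySem.List.pyGet? r.2 (((pvLastIdxFrom hdrs 0 h).getD 0 : Nat) : Int)).getD ""))
      (by
        rw [pvWriteRowA_items r.1 r.2 hdrs 0 m hnd hmem, hm, List.map_map]
        apply List.map_congr_left
        intro h hh
        obtain ⟨j, hj⟩ := pvLastIdxFrom_mem hdrs 0 h ((PySem.List.mem_dedup hdrs h).mp hh)
        simp only [Function.comp_apply, hj, Option.getD_some])]
    apply List.map_congr_left
    intro h _
    rw [List.foldl_cons]

-- the items of A's finished metrics dict
theorem pvA_items_final (hdrs : List String) (rows : List (String × List String)) :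
    (rows.foldl (fun m r => pvWriteRowA r.1 r.2 m 0 hdrs)
        (hdrs.foldl (fun m h => m.insert h PySem.Dict.empty) PySem.Dict.empty)).items =
      (PySem.List.dedup hdrs).map (fun h => (h, pvColB rows ((pvLastIdxFrom hdrs 0 h).getD 0))) := by
  rw [pvFoldA_items hdrs rows _ (fun _ => PySem.Dict.empty)
    (by rw [pvInit_items hdrs PySem.Dict.empty]
        simp [PySem.Dict.contains_empty, pvDictItemsEmpty])]
  rfl

-- B's column dicts are nonempty as soon as the row table is
theorem pvColB_keys (rows : List (String × List String)) (i : Nat) :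
    (pvColB rows i).keys = PySem.Set.update ((PySem.Dict.empty : PySem.Dict String String).keys)
      (rows.map (fun r => r.1)) :=
  PySem.Dict.keys_foldl_insert_key rows (fun r => r.1)
    (fun _ r => (PySem.List.pyGet? r.2 (i : Int)).getD "") PySem.Dict.empty

theorem pvColB_items_ne (rows : List (String × List String)) (hr : rows ≠ []) (i : Nat) :
    (pvColB rows i).items ≠ [] := by
  intro hnil
  obtain ⟨r, t, rfl⟩ := List.exists_cons_of_ne_nil hr
  have hk : (pvColB (r :: t) i).keys = [] := by simp [PySem.Dict.keys, hnil]
  rw [pvColB_keys, PySem.Dict.keys_empty] at hk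
  have : r.1 ∈ PySem.Set.update ([] : List String) ((r :: t).map (fun r => r.1)) := by
    have : r.1 ∈ (r :: t).map (fun r => r.1) := List.mem_map_of_mem List.mem_cons_self
    exact (PySem.Set.mem_ofList _ _).mpr this
  rw [hk] at this
  cases this

theorem pvBuildResB_nilrows : ∀ (hs : List String) (i : Nat)
    (res : PySem.Dict String (PySem.Dict String String)),
    pvBuildResB [] res i hs = res := by
  intro hs
  induction hs with
  | nil => intro i res; rfl
  | cons h t ih =>
    intro i res
    simp only [pvBuildResB]
    have : (pvColB [] i).items.isEmpty = true := rfl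
    rw [this]
    exact ih (i + 1) res

-- a key distinct from the head header keeps its last index in the tail
theorem pvLastIdxFrom_cons_ne (h : String) (t : List String) (i : Nat) (x : String)
    (hne : x ≠ h) : pvLastIdxFrom (h :: t) i x = pvLastIdxFrom t (i + 1) x := by
  simp only [pvLastIdxFrom]
  cases pvLastIdxFrom t (i + 1) x with
  | some j => rfl
  | none => rw [if_neg (fun he => hne he.symm)]

-- B's outer loop, characterised
theorem pvBuildResB_items (rows : List (String × List String)) (hr : rows ≠ []) :
    ∀ (hs : List String) (i : Nat) (res : PySem.Dict String (PySem.Dict String String)),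
    (pvBuildResB rows res i hs).items =
      res.items.map (fun kv =>
          match pvLastIdxFrom hs i kv.1 with
          | some j => (kv.1, pvColB rows j)
          | none => kv) ++
        ((PySem.List.dedup hs).filter (fun h => !res.contains h)).map
          (fun h => (h, pvColB rows ((pvLastIdxFrom hs i h).getD 0))) := by
  intro hs
  induction hs with
  | nil =>
    intro i res
    simp [pvBuildResB, pvLastIdxFrom, PySem.List.dedup, PySem.Set.ofList]
  | cons h t ih =>
    intro i res
    simp only [pvBuildResB]
    have hcolne : (pvColB rows i).items.isEmpty = false := by
      cases hE : (pvColB rows i).items.isEmpty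
      · rfl
      · exact absurd (List.isEmpty_iff.mp hE) (pvColB_items_ne rows hr i)
    rw [hcolne]
    simp only [Bool.false_eq_true, if_false]
    rw [ih (i + 1) (res.insert h (pvColB rows i))]
    rw [PySem.List.dedup_eq_ofList (h :: t), PySem.Set.ofList_cons, ← PySem.List.dedup_eq_ofList t]
    have hfeq : (PySem.List.dedup t).filter (fun x => !(res.insert h (pvColB rows i)).contains x)
        = List.filter (fun x => !res.contains x)
            (List.filter (fun y => !(y == h)) (PySem.List.dedup t)) := by
      rw [List.filter_filter]
      apply List.filter_congr
      intro x hx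
      rw [PySem.Dict.contains_insert]
      cases hxe : (x == h) <;> simp [hxe]
    have hmapmatch : ∀ (L : List String), (∀ x ∈ L, x ≠ h) →
        L.map (fun h' => (h', pvColB rows ((pvLastIdxFrom t (i + 1) h').getD 0)))
          = L.map (fun h' => (h', pvColB rows ((pvLastIdxFrom (h :: t) i h').getD 0))) := by
      intro L hL
      apply List.map_congr_left
      intro x hx
      rw [pvLastIdxFrom_cons_ne h t i x (hL x hx)]
    by_cases hc : res.contains h = true
    · rw [PySem.Dict.items_insert_of_contains res _ hc, List.map_map]
      congr 1
      · apply List.map_congr_left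
        intro kv hkv
        simp only [Function.comp_apply]
        by_cases hk : kv.1 = h
        · rw [if_pos (by simp [hk])]
          simp only [pvLastIdxFrom, ← hk]
          cases hLt : pvLastIdxFrom t (i + 1) kv.1 with
          | some j => rfl
          | none => simp
        · rw [if_neg (by simp [hk])]
          rw [pvLastIdxFrom_cons_ne h t i kv.1 hk]
      · rw [List.filter_cons_of_neg (by simp [hc]), PySem.Set.discard, hfeq]
        apply hmapmatch
        intro x hx
        have := (List.mem_filter.mp (List.mem_filter.mp hx).1).2
        simpa using this
    · have hcf : res.contains h = false := by simpa using hc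
      have hne : ∀ kv ∈ res.items, kv.1 ≠ h := by
        intro kv hkv he
        have : res.items.any (fun p => p.1 == h) = true :=
          List.any_eq_true.mpr ⟨kv, hkv, by simp [he]⟩
        rw [show res.items.any (fun p => p.1 == h) = res.contains h from rfl, hcf] at this
        cases this
      rw [PySem.Dict.items_insert_of_not_contains res _ hcf, List.map_append]
      rw [List.filter_cons_of_pos (by simp [hcf])]
      simp only [List.map_cons]
      rw [List.append_assoc]
      congr 1
      · apply List.map_congr_left
        intro kv hkv
        rw [pvLastIdxFrom_cons_ne h t i kv.1 (hne kv hkv)]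
      · simp only [List.map_cons, List.singleton_append, List.cons_append, List.nil_append]
        congr 1
        · simp only [pvLastIdxFrom]
          cases hLt : pvLastIdxFrom t (i + 1) h with
          | some j => rfl
          | none => simp
        · rw [PySem.Set.discard, hfeq]
          apply hmapmatch
          intro x hx
          have := (List.mem_filter.mp (List.mem_filter.mp hx).1).2
          simpa using this

-- proof-side names for the two ports' computations after the table slice is split into lines
def pvTailA (lines : List String) : List (String × List (String × String)) :=
  if pvFindHeaderA lines 0 = -1 ∨ (lines.length : Int) ≤ pvFindHeaderA lines 0 + 1 then []
  else
    ((((PySem.List.slice lines (some (pvFindHeaderA lines 0 + 2)) none).foldl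
        (pvStepA (pvColHeadersA
          (PySem.Str.split₀ ((PySem.List.pyGet? lines (pvFindHeaderA lines 0)).getD ""))
          (PySem.Str.split₀ ((PySem.List.pyGet? lines (pvFindHeaderA lines 0 + 1)).getD ""))))
        ((pvColHeadersA
          (PySem.Str.split₀ ((PySem.List.pyGet? lines (pvFindHeaderA lines 0)).getD ""))
          (PySem.Str.split₀ ((PySem.List.pyGet? lines (pvFindHeaderA lines 0 + 1)).getD ""))).foldl
          (fun m h => m.insert h PySem.Dict.empty) PySem.Dict.empty)).items).filter
      (fun kv => !kv.2.items.isEmpty)).map (fun kv => (kv.1, kv.2.items))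

def pvTailB (lines : List String) : List (String × List (String × String)) :=
  if lines.length ≤ pvScanB lines 0 + 1 then []
  else
    (pvBuildColsB
      (PySem.List.slice lines (some ((pvScanB lines 0 : Int) + 2)) none)
      (pvHeadersB
        (PySem.Str.split₀ ((PySem.List.pyGet? lines (pvScanB lines 0 : Int)).getD ""))
        (PySem.Str.split₀ ((PySem.List.pyGet? lines ((pvScanB lines 0 : Int) + 1)).getD ""))).length
      PySem.Dict.empty 0
      (pvHeadersB
        (PySem.Str.split₀ ((PySem.List.pyGet? lines (pvScanB lines 0 : Int)).getD ""))
        (PySem.Str.split₀ ((PySem.List.pyGet? lines ((pvScanB lines 0 : Int) + 1)).getD "")))).items.map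
      (fun kv => (kv.1, kv.2.items))

-- the heart of the equivalence: on any line list admitted by pvHeaderOk, the two tails agree
theorem pvTail_eq (lines : List String) (hok : pvHeaderOk lines = true) :
    pvTailA lines = pvTailB lines := by
  unfold pvTailA pvTailB
  cases hIdx : lines.findIdx? pvIsHeaderLine with
  | none =>
    have hA : pvFindHeaderA lines 0 = -1 := by rw [pvFindHeaderA_eq, hIdx]
    have hB : pvScanB lines 0 = lines.length := by rw [pvScanB_eq, hIdx]; simp
    rw [hA, hB]
    simp
  | some hi =>
    have hA : pvFindHeaderA lines 0 = (hi : Int) := by rw [pvFindHeaderA_eq, hIdx]; simp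
    have hB : pvScanB lines 0 = hi := by rw [pvScanB_eq, hIdx]; simp
    rw [hA, hB]
    by_cases hsz : lines.length ≤ hi + 1
    · rw [if_pos (Or.inr (by exact_mod_cast Nat.cast_le.mpr hsz)), if_pos hsz]
    · have hszi : ¬((hi : Int) = -1 ∨ (lines.length : Int) ≤ (hi : Int) + 1) := by
        rintro (h | h)
        · omega
        · have : (lines.length : Int) ≤ ((hi + 1 : Nat) : Int) := by push_cast; omega
          have : lines.length ≤ hi + 1 := by exact_mod_cast this
          exact hsz this
      rw [if_neg hszi, if_neg hsz]
      have hg1 : (PySem.List.pyGet? lines ((hi : Nat) : Int)).getD "" = lines.getD hi "" := by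
        rw [PySem.List.pyGet?_natCast]
        exact List.getD_eq_getElem?_getD.symm
      have hg2 : (PySem.List.pyGet? lines ((hi : Int) + 1)).getD "" = lines.getD (hi + 1) "" := by
        rw [show ((hi : Int) + 1) = (((hi + 1 : Nat)) : Int) by push_cast; ring,
          PySem.List.pyGet?_natCast]
        exact List.getD_eq_getElem?_getD.symm
      rw [hg1, hg2]
      unfold pvHeaderOk at hok
      rw [hIdx] at hok
      simp only [Bool.or_eq_true, decide_eq_true_eq] at hok
      have hlen : (PySem.Str.split₀ (lines.getD hi "")).length = 0 ∨
          (PySem.Str.split₀ (lines.getD hi "")).length + 1 ≤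
            (PySem.Str.split₀ (lines.getD (hi + 1) "")).length := by
        rcases hok with h | h
        · exact absurd h hsz
        · exact h
      rw [pvHeaders_eq _ _ hlen]
      rw [pvFold_filterMap, pvBuildColsB_eq]
      generalize (PySem.List.slice lines (some ((hi : Int) + 2)) none).filterMap
          (pvParseRowB (pvHeadersB (PySem.Str.split₀ (lines.getD hi ""))
            (PySem.Str.split₀ (lines.getD (hi + 1) ""))).length) = rows
      generalize pvHeadersB (PySem.Str.split₀ (lines.getD hi ""))
          (PySem.Str.split₀ (lines.getD (hi + 1) "")) = hdrs
      cases rows with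
      | nil =>
        rw [List.foldl_nil, pvBuildResB_nilrows, pvDictItemsEmpty, pvInit_items hdrs PySem.Dict.empty]
        simp only [pvDictItemsEmpty, List.map_nil, List.nil_append, PySem.Dict.contains_empty,
          Bool.not_false, List.filter_true]
        have hfil : List.filter (fun kv => !kv.2.items.isEmpty)
            ((PySem.List.dedup hdrs).map (fun h => (h, (PySem.Dict.empty : PySem.Dict String String)))) = [] := by
          apply List.filter_eq_nil_iff.mpr
          intro kv hkv
          obtain ⟨h, _, rfl⟩ := List.mem_map.mp hkv
          simp [pvDictItemsEmpty]
        rw [hfil]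
        rfl
      | cons r rs =>
        rw [pvA_items_final hdrs (r :: rs),
          pvBuildResB_items (r :: rs) (List.cons_ne_nil r rs) hdrs 0 PySem.Dict.empty]
        simp only [pvDictItemsEmpty, List.map_nil, List.nil_append, PySem.Dict.contains_empty,
          Bool.not_false, List.filter_true]
        have hfil : List.filter (fun kv => !kv.2.items.isEmpty)
            ((PySem.List.dedup hdrs).map (fun h =>
              (h, pvColB (r :: rs) ((pvLastIdxFrom hdrs 0 h).getD 0)))) =
            (PySem.List.dedup hdrs).map (fun h =>
              (h, pvColB (r :: rs) ((pvLastIdxFrom hdrs 0 h).getD 0))) := by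
          apply List.filter_eq_self.mpr
          intro kv hkv
          obtain ⟨h, _, rfl⟩ := List.mem_map.mp hkv
          cases hE : (pvColB (r :: rs) ((pvLastIdxFrom hdrs 0 h).getD 0)).items.isEmpty with
          | true => exact absurd (List.isEmpty_iff.mp hE) (pvColB_items_ne _ (List.cons_ne_nil r rs) _)
          | false => simp
        rw [hfil]

-- no occurrence of the end phrase can begin inside the start phrase ('H' is not among its chars)
theorem pvNoOcc (u : List Char) (hpre : "Quality metrics table".toList <+: u) :
    ∀ i, i < 21 → ¬ "HiC contact map of curated assembly".toList <+: u.drop i := by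
  intro i hi hocc
  have h21 : ("Quality metrics table".toList).length = 21 := by decide
  have hlenu : 21 ≤ u.length := by have := hpre.length_le; omega
  have hiu : i < u.length := by omega
  have h2len : 0 < ("HiC contact map of curated assembly".toList).length := by decide
  have hdlen : 0 < (u.drop i).length := by
    have := hocc.length_le
    simp only [List.length_drop] at this ⊢
    omega
  have e2 : ("HiC contact map of curated assembly".toList)[0]'(by decide) = (u.drop i)[0]'hdlen :=
    hocc.getElem (by decide)
  rw [List.getElem_drop] at e2
  have e1 : ("Quality metrics table".toList)[i]'(by omega) = u[i]'hiu := hpre.getElem (by omega)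
  have hH : ("Quality metrics table".toList)[i]'(by omega) = 'H' := by
    rw [e1]
    have hh0 : ("HiC contact map of curated assembly".toList)[0]'(by decide) = 'H' := by decide
    rw [hh0] at e2
    simpa using e2.symm
  have hmem : 'H' ∈ "Quality metrics table".toList := by
    rw [← hH]
    exact List.getElem_mem _
  exact absurd hmem (by decide)

-- hence the first occurrence of the end phrase after the start phrase is 21 + its first
-- occurrence past the start phrase
theorem pvFindShift (u : List Char) (hpre : "Quality metrics table".toList <+: u) :
    PySem.Chars.find u ("HiC contact map of curated assembly".toList) =
      if PySem.Chars.find (u.drop 21) ("HiC contact map of curated assembly".toList) = -1 then -1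
      else 21 + PySem.Chars.find (u.drop 21) ("HiC contact map of curated assembly".toList) := by
  by_cases hfv : PySem.Chars.find (u.drop 21) ("HiC contact map of curated assembly".toList) = -1
  · rw [if_pos hfv]
    rw [PySem.Chars.find_eq_neg_one_iff] at hfv ⊢
    intro hinf
    apply hfv
    have hnn : 0 ≤ PySem.Chars.find u ("HiC contact map of curated assembly".toList) := (PySem.Chars.find_nonneg_iff u ("HiC contact map of curated assembly".toList)).mpr hinf
    obtain ⟨hFpre, hFmin⟩ := PySem.Chars.find_spec hnn
    have hF21 : 21 ≤ (PySem.Chars.find u ("HiC contact map of curated assembly".toList)).toNat := by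
      by_contra h
      exact pvNoOcc u hpre _ (by omega) hFpre
    have hvp : ("HiC contact map of curated assembly".toList) <+: (u.drop 21).drop ((PySem.Chars.find u ("HiC contact map of curated assembly".toList)).toNat - 21) := by
      rw [List.drop_drop,
        show 21 + ((PySem.Chars.find u ("HiC contact map of curated assembly".toList)).toNat - 21) = (PySem.Chars.find u ("HiC contact map of curated assembly".toList)).toNat by omega]
      exact hFpre
    have hex : ∃ j, ("HiC contact map of curated assembly".toList) <+: (u.drop 21).drop j := ⟨_, hvp⟩
    rw [PySem.Chars.exists_prefix_drop_iff_isIn, PySem.Chars.isIn_iff_infix] at hex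
    exact hex
  · rw [if_neg hfv]
    have hneg1 := PySem.Chars.neg_one_le_find (u.drop 21) ("HiC contact map of curated assembly".toList)
    have hvnn : 0 ≤ PySem.Chars.find (u.drop 21) ("HiC contact map of curated assembly".toList) := by omega
    obtain ⟨hvpre, hvmin⟩ := PySem.Chars.find_spec hvnn
    have hocc : ("HiC contact map of curated assembly".toList) <+: u.drop (21 + (PySem.Chars.find (u.drop 21) ("HiC contact map of curated assembly".toList)).toNat) := by
      rw [← List.drop_drop]
      exact hvpre
    have hinf : ("HiC contact map of curated assembly".toList) <:+: u := by
      have hex : ∃ j, ("HiC contact map of curated assembly".toList) <+: u.drop j := ⟨_, hocc⟩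
      rw [PySem.Chars.exists_prefix_drop_iff_isIn, PySem.Chars.isIn_iff_infix] at hex
      exact hex
    have hnn : 0 ≤ PySem.Chars.find u ("HiC contact map of curated assembly".toList) := (PySem.Chars.find_nonneg_iff u ("HiC contact map of curated assembly".toList)).mpr hinf
    obtain ⟨hFpre, hFmin⟩ := PySem.Chars.find_spec hnn
    have hF21 : 21 ≤ (PySem.Chars.find u ("HiC contact map of curated assembly".toList)).toNat := by
      by_contra h
      exact pvNoOcc u hpre _ (by omega) hFpre
    have hle1 : (PySem.Chars.find u ("HiC contact map of curated assembly".toList)).toNat ≤ 21 + (PySem.Chars.find (u.drop 21) ("HiC contact map of curated assembly".toList)).toNat := by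
      by_contra h
      exact hFmin _ (by omega) hocc
    have hvp : ("HiC contact map of curated assembly".toList) <+: (u.drop 21).drop ((PySem.Chars.find u ("HiC contact map of curated assembly".toList)).toNat - 21) := by
      rw [List.drop_drop,
        show 21 + ((PySem.Chars.find u ("HiC contact map of curated assembly".toList)).toNat - 21) = (PySem.Chars.find u ("HiC contact map of curated assembly".toList)).toNat by omega]
      exact hFpre
    have hle2 : (PySem.Chars.find (u.drop 21) ("HiC contact map of curated assembly".toList)).toNat ≤ (PySem.Chars.find u ("HiC contact map of curated assembly".toList)).toNat - 21 := by
      by_contra h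
      exact hvmin _ (by omega) hvp
    omega

-- A's end index, rewritten through the remainder string B partitions on
theorem pvEndA_eq (text : String)
    (h1 : PySem.Str.find text "Quality metrics table" ≠ -1) :
    PySem.Str.findFrom text "HiC contact map of curated assembly"
        (PySem.Str.find text "Quality metrics table") =
      if PySem.Str.find (PySem.Str.slice text
            (some (PySem.Str.find text "Quality metrics table" + PySem.Str.len "Quality metrics table")) none)
          "HiC contact map of curated assembly" = -1
      then -1
      else PySem.Str.find text "Quality metrics table" + 21 +
        PySem.Str.find (PySem.Str.slice text
            (some (PySem.Str.find text "Quality metrics table" + PySem.Str.len "Quality metrics table")) none)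
          "HiC contact map of curated assembly" := by
  have hlen21 : PySem.Str.len "Quality metrics table" = 21 := by decide
  rw [hlen21]
  simp only [PySem.Str.find_eq, PySem.Str.findFrom_eq, PySem.Str.toList_slice,
    PySem.Chars.slice_eq_listSlice] at h1 ⊢
  have hneg1 := PySem.Chars.neg_one_le_find text.toList ("Quality metrics table".toList)
  have hnn : 0 ≤ PySem.Chars.find text.toList ("Quality metrics table".toList) := by omega
  have hlelen := PySem.Chars.find_le_length text.toList ("Quality metrics table".toList)
  obtain ⟨hpre, -⟩ := PySem.Chars.find_spec hnn
  obtain ⟨a, ha⟩ : ∃ a : Nat, PySem.Chars.find text.toList ("Quality metrics table".toList) = (a : Int) :=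
    ⟨_, (Int.toNat_of_nonneg hnn).symm⟩
  rw [ha] at hpre hlelen ⊢
  simp only [Int.toNat_natCast] at hpre
  have hsl : PySem.List.slice text.toList (some ((a : Int) + 21)) none = text.toList.drop (a + 21) := by
    rw [show ((a : Int) + 21) = ((a + 21 : Nat) : Int) by push_cast; ring,
      PySem.List.slice_from _ (Int.natCast_nonneg _), Int.toNat_natCast]
  rw [hsl]
  rw [PySem.Chars.findFrom_natCast text.toList _ a (by exact_mod_cast hlelen)]
  rw [show text.toList.drop (a + 21) = (text.toList.drop a).drop 21 by rw [List.drop_drop]]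
  rw [pvFindShift (text.toList.drop a) hpre]
  by_cases hfv : PySem.Chars.find ((text.toList.drop a).drop 21)
      ("HiC contact map of curated assembly".toList) = -1
  · simp only [hfv]
    norm_num
  · rw [if_neg hfv]
    have h0 := PySem.Chars.neg_one_le_find ((text.toList.drop a).drop 21)
      ("HiC contact map of curated assembly".toList)
    rw [if_neg (by omega), if_neg hfv]
    ring

-- the table slice A cuts equals the start phrase glued to B's partition body
theorem pvTable_eq (text : String)
    (h1 : PySem.Str.find text "Quality metrics table" ≠ -1)
    (h2 : PySem.Str.find (PySem.Str.slice text
            (some (PySem.Str.find text "Quality metrics table" + PySem.Str.len "Quality metrics table")) none)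
          "HiC contact map of curated assembly" ≠ -1) :
    PySem.Str.slice text (some (PySem.Str.find text "Quality metrics table"))
        (some (PySem.Str.findFrom text "HiC contact map of curated assembly"
          (PySem.Str.find text "Quality metrics table"))) =
      PySem.Str.join "" ["Quality metrics table",
        PySem.Str.slice (PySem.Str.slice text
            (some (PySem.Str.find text "Quality metrics table" + PySem.Str.len "Quality metrics table")) none)
          none
          (some (PySem.Str.find (PySem.Str.slice text
              (some (PySem.Str.find text "Quality metrics table" + PySem.Str.len "Quality metrics table")) none)
            "HiC contact map of curated assembly"))] := by
  apply String.toList_inj.mp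
  rw [pvEndA_eq text h1, if_neg h2]
  have hlen21 : PySem.Str.len "Quality metrics table" = 21 := by decide
  rw [hlen21] at h2 ⊢
  simp only [PySem.Str.find_eq, PySem.Str.toList_slice, PySem.Str.toList_join,
    PySem.Chars.slice_eq_listSlice, List.map_cons, List.map_nil] at h1 h2 ⊢
  have hneg1 := PySem.Chars.neg_one_le_find text.toList ("Quality metrics table".toList)
  have hnn : 0 ≤ PySem.Chars.find text.toList ("Quality metrics table".toList) := by omega
  have hlelen := PySem.Chars.find_le_length text.toList ("Quality metrics table".toList)
  obtain ⟨hpre, -⟩ := PySem.Chars.find_spec hnn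
  obtain ⟨a, ha⟩ : ∃ a : Nat, PySem.Chars.find text.toList ("Quality metrics table".toList) = (a : Int) :=
    ⟨_, (Int.toNat_of_nonneg hnn).symm⟩
  rw [ha] at hpre hlelen h2 ⊢
  simp only [Int.toNat_natCast] at hpre
  have hsl : PySem.List.slice text.toList (some ((a : Int) + 21)) none = text.toList.drop (a + 21) := by
    rw [show ((a : Int) + 21) = ((a + 21 : Nat) : Int) by push_cast; ring,
      PySem.List.slice_from _ (Int.natCast_nonneg _), Int.toNat_natCast]
  rw [hsl] at h2 ⊢
  have hneg2 := PySem.Chars.neg_one_le_find (text.toList.drop (a + 21))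
    ("HiC contact map of curated assembly".toList)
  have hnn2 : 0 ≤ PySem.Chars.find (text.toList.drop (a + 21))
      ("HiC contact map of curated assembly".toList) := by omega
  obtain ⟨b, hb⟩ : ∃ b : Nat, PySem.Chars.find (text.toList.drop (a + 21))
      ("HiC contact map of curated assembly".toList) = (b : Int) :=
    ⟨_, (Int.toNat_of_nonneg hnn2).symm⟩
  rw [hb]
  rw [show ((a : Int) + 21 + (b : Int)) = ((a + 21 + b : Nat) : Int) by push_cast; ring]
  rw [PySem.List.slice_natCast, PySem.List.slice_to _ (Int.natCast_nonneg b), Int.toNat_natCast]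
  rw [show a + 21 + b - a = 21 + b by omega]
  rw [List.take_add]
  have htk : List.take 21 (text.toList.drop a) = "Quality metrics table".toList := by
    have hpt := List.prefix_iff_eq_take.mp hpre
    have h21 : ("Quality metrics table".toList).length = 21 := by decide
    rw [h21] at hpt
    exact hpt.symm
  rw [htk, show (text.toList.drop a).drop 21 = text.toList.drop (a + 21) by rw [List.drop_drop]]
  rw [PySem.Chars.join_cons_cons, PySem.Chars.join_singleton]
  simp

-- ===== VERDICT (by name: the statement is the Claim_ definition above) =====
set_option maxHeartbeats 1000000 in
theorem extract_metrics_table_spec : Claim_equal_extract_metrics_table := by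
  intro text _ hpre
  show extract_metrics_table text = extract_metrics_table_alt text
  by_cases h1 : PySem.Str.find text "Quality metrics table" = -1
  · have hA : extract_metrics_table text = [] := by
      unfold extract_metrics_table
      rw [if_pos (Or.inl h1)]
    have hB : extract_metrics_table_alt text = [] := by
      simp only [extract_metrics_table_alt, pvPartition]
      rw [if_pos h1]
      simp
    rw [hA, hB]
  · have hp : pvPartition text "Quality metrics table" =
        (PySem.Str.slice text none (some (PySem.Str.find text "Quality metrics table")),
         "Quality metrics table",
         PySem.Str.slice text (some (PySem.Str.find text "Quality metrics table" +
           PySem.Str.len "Quality metrics table")) none) := by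
      unfold pvPartition
      rw [if_neg h1]
    by_cases h2 : PySem.Str.find (PySem.Str.slice text
        (some (PySem.Str.find text "Quality metrics table" + PySem.Str.len "Quality metrics table")) none)
        "HiC contact map of curated assembly" = -1
    · have hend := pvEndA_eq text h1
      rw [if_pos h2] at hend
      have hA : extract_metrics_table text = [] := by
        unfold extract_metrics_table
        rw [if_pos (Or.inr hend)]
      have hB : extract_metrics_table_alt text = [] := by
        simp only [extract_metrics_table_alt, hp]
        rw [if_neg (show ¬("Quality metrics table" = "") by decide)]
        simp only [pvPartition]
        rw [if_pos h2]
        simp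
      rw [hA, hB]
    · have hend := pvEndA_eq text h1
      rw [if_neg h2] at hend
      have e1 : -1 ≤ PySem.Str.find text "Quality metrics table" := by
        rw [PySem.Str.find_eq]
        exact PySem.Chars.neg_one_le_find _ _
      have e2 : -1 ≤ PySem.Str.find (PySem.Str.slice text
          (some (PySem.Str.find text "Quality metrics table" + PySem.Str.len "Quality metrics table")) none)
          "HiC contact map of curated assembly" := by
        rw [PySem.Str.find_eq]
        exact PySem.Chars.neg_one_le_find _ _
      have hendne : PySem.Str.findFrom text "HiC contact map of curated assembly"
          (PySem.Str.find text "Quality metrics table") ≠ -1 := by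
        rw [hend]
        omega
      have hok : pvHeaderOk (pvTableLines text) = true := by
        rcases hpre with h | h | h
        · exact absurd h h1
        · exact absurd h hendne
        · exact h
      have hq : pvPartition (PySem.Str.slice text
          (some (PySem.Str.find text "Quality metrics table" + PySem.Str.len "Quality metrics table")) none)
          "HiC contact map of curated assembly" =
          (PySem.Str.slice (PySem.Str.slice text
              (some (PySem.Str.find text "Quality metrics table" + PySem.Str.len "Quality metrics table")) none)
            none
            (some (PySem.Str.find (PySem.Str.slice text
                (some (PySem.Str.find text "Quality metrics table" + PySem.Str.len "Quality metrics table")) none)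
              "HiC contact map of curated assembly")),
           "HiC contact map of curated assembly",
           PySem.Str.slice (PySem.Str.slice text
              (some (PySem.Str.find text "Quality metrics table" + PySem.Str.len "Quality metrics table")) none)
            (some (PySem.Str.find (PySem.Str.slice text
                (some (PySem.Str.find text "Quality metrics table" + PySem.Str.len "Quality metrics table")) none)
              "HiC contact map of curated assembly" +
              PySem.Str.len "HiC contact map of curated assembly")) none) := by
        unfold pvPartition
        rw [if_neg h2]
      have hA : extract_metrics_table text = pvTailA (pvTableLines text) := by
        unfold extract_metrics_table
        rw [if_neg (by
          rintro (h | h)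
          · exact h1 h
          · exact hendne h)]
        rfl
      have hB : extract_metrics_table_alt text = pvTailB (pvTableLines text) := by
        simp only [extract_metrics_table_alt, hp]
        rw [if_neg (show ¬("Quality metrics table" = "") by decide)]
        simp only [hq]
        rw [if_neg (show ¬("HiC contact map of curated assembly" = "") by decide)]
        rw [← pvTable_eq text h1 h2]
        rfl
      rw [hA, hB]
      exact pvTail_eq _ hok
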